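-- pv_equiv track=rewrite | github.com/zaq851017/adl_final | preprocess.py | setBound
-- ===== SOURCE A (Python) =====
-- def removeSpace(inputStr):
--     outputStr = inputStr.replace(" ", "")
--     outputStr = outputStr.replace("\n", "")
--     return outputStr
--
-- def setBound(texts):
--     prevBound = 1
--     index_bound = []
--     for i, text in enumerate(texts):
--         if i == 0:
--             prevBound += len(removeSpace(text))
--         else:
--             index_bound.append([prevBound, prevBound + len(removeSpace(text))])
--             prevBound += len(removeSpace(text))
--     return index_bound
-- ===== SOURCE B (Python) =====
-- def setBound(texts):
--     prefix = [1]
--     for t in texts: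
--         prefix.append(prefix[-1] + len([c for c in t if c != " " and c != "\n"]))
--     return [list(p) for p in zip(prefix[1:-1], prefix[2:])]
-- ===== Notes on version B (the rewrite author's own statement) =====
-- stated objective: alternative
-- what changed: B builds a cumulative prefix table of space-free lengths (counted by filtering characters instead of building replaced strings) and forms the bounds by zipping consecutive prefix entries, instead of A's enumerate loop that threads prevBound and special-cases index 0.
import Mathlib
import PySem

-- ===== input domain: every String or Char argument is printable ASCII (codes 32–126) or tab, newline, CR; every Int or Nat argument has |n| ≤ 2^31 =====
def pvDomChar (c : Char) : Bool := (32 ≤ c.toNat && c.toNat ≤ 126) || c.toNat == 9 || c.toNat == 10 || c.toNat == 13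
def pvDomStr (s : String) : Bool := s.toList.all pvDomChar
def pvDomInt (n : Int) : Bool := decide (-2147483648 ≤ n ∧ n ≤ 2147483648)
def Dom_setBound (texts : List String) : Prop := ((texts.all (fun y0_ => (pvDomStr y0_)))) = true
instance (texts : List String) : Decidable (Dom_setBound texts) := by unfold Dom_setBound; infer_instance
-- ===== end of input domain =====

-- B replaces A's prevBound-threading enumerate loop by a cumulative prefix table
-- (lengths counted by filtering characters, no intermediate replaced strings) zipped pairwise.

-- ===== PORT A =====
def removeSpace (inputStr : String) : String :=
  let outputStr := PySem.Str.replace inputStr " " ""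
  let outputStr := PySem.Str.replace outputStr "\n" ""
  outputStr

def setBound (texts : List String) : List (List Int) :=
  ((PySem.List.enumerate texts 0).foldl
    (fun (st : Int × List (List Int)) it =>
      if it.1 = 0 then
        (st.1 + PySem.Str.len (removeSpace it.2), st.2)
      else
        (st.1 + PySem.Str.len (removeSpace it.2),
         st.2 ++ [[st.1, st.1 + PySem.Str.len (removeSpace it.2)]]))
    (1, [])).2

-- ===== PORT B =====
def noSpaceLen (t : String) : Int :=
  ((t.toList.filter (fun c => c != ' ' && c != '\n')).length : Int)

def setBound_alt (texts : List String) : List (List Int) :=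
  let pref := texts.foldl
    (fun (p : List Int) t => p ++ [PySem.List.pyGetD p (-1) 0 + noSpaceLen t]) [1]
  ((PySem.List.slice pref (some 1) (some (-1))).zip
    (PySem.List.slice pref (some 2) none)).map (fun q => [q.1, q.2])

-- ===== PRECONDITION & SPEC =====
def Spec_setBound (texts : List String) (out : List (List Int)) : Prop := out = setBound_alt texts
instance (texts : List String) (out : List (List Int)) : Decidable (Spec_setBound texts out) := by unfold Spec_setBound; infer_instance

-- ===== CLAIM (what is proved, stated in full; the proofs are below) =====
def Claim_equal_setBound : Prop := ∀ (texts : List String), Dom_setBound texts → Spec_setBound texts (setBound texts)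

-- ===== LEMMAS AND PROOFS =====

-- scan of cumulative bounds starting at b
def pvScan (b : Int) : List String → List Int
  | [] => [b]
  | t :: r => b :: pvScan (b + noSpaceLen t) r

-- the list of [lo, hi] pairs both programs produce after the first text
def pvPairs (b : Int) : List String → List (List Int)
  | [] => []
  | t :: r => [b, b + noSpaceLen t] :: pvPairs (b + noSpaceLen t) r

lemma replace_go_filter (c : Char) : ∀ (fuel : Nat) (l acc : List Char), l.length ≤ fuel →
    PySem.Chars.replace.go [c] [] fuel l acc = acc.reverse ++ l.filter (fun x => x != c) := by
  intro fuel
  induction fuel with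
  | zero =>
    intro l acc h
    have : l = [] := List.eq_nil_of_length_eq_zero (Nat.le_zero.mp h)
    subst this
    simp [PySem.Chars.replace.go]
  | succ n ih =>
    intro l acc h
    cases l with
    | nil => simp [PySem.Chars.replace.go]
    | cons c' t =>
      simp only [PySem.Chars.replace.go, List.isPrefixOf, Bool.and_true]
      by_cases hc : c = c'
      · subst hc
        simp only [BEq.rfl, if_true, List.reverse_nil, List.nil_append]
        rw [show List.drop [c].length (c :: t) = t from rfl]
        rw [ih t acc (by simpa using Nat.le_of_succ_le_succ h)]
        simp
      · have hne : (c == c') = false := by simp [hc]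
        simp only [hne]
        rw [if_neg (by simp)]
        rw [ih t (c' :: acc) (by simpa using Nat.le_of_succ_le_succ h)]
        have : (c' != c) = true := by simp [Ne.symm hc]
        simp [this]

lemma replace_filter (c : Char) (s : List Char) :
    PySem.Chars.replace s [c] [] = s.filter (fun x => x != c) := by
  rw [PySem.Chars.replace]
  simp [replace_go_filter c s.length s [] (le_refl _)]

lemma removeSpace_len (t : String) :
    PySem.Str.len (removeSpace t) = noSpaceLen t := by
  unfold removeSpace noSpaceLen
  rw [PySem.Str.len_eq, PySem.Str.toList_replace, PySem.Str.toList_replace]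
  rw [show (" " : String).toList = [' '] from rfl,
      show ("\n" : String).toList = ['\n'] from rfl,
      show ("" : String).toList = [] from rfl,
      replace_filter, replace_filter, List.filter_filter]
  congr 2
  apply List.filter_congr
  intro a _
  rw [Bool.and_comm]

set_option maxHeartbeats 1000000 in
lemma foldA (l : List (Int × String)) : ∀ (b : Int) (acc : List (List Int)),
    (∀ p ∈ l, p.1 ≠ 0) →
    (l.foldl
      (fun (st : Int × List (List Int)) it =>
        if it.1 = 0 then
          (st.1 + PySem.Str.len (removeSpace it.2), st.2)
        else
          (st.1 + PySem.Str.len (removeSpace it.2),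
           st.2 ++ [[st.1, st.1 + PySem.Str.len (removeSpace it.2)]]))
      (b, acc)).2 = acc ++ pvPairs b (l.map (·.2)) := by
  induction l with
  | nil =>
    intro b acc _
    rw [List.foldl_nil, List.map_nil]
    rw [show pvPairs b ([] : List String) = [] from rfl, List.append_nil]
  | cons p r ih =>
    intro b acc hidx
    have hp : p.1 ≠ 0 := hidx p List.mem_cons_self
    simp only [List.foldl_cons, if_neg hp]
    rw [ih _ _ (fun q hq => hidx q (List.mem_cons_of_mem _ hq))]
    rw [List.map_cons, removeSpace_len,
        show pvPairs b (p.2 :: r.map (fun x => x.2)) =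
            [b, b + noSpaceLen p.2] :: pvPairs (b + noSpaceLen p.2) (r.map (fun x => x.2)) from rfl,
        List.append_assoc, List.singleton_append]

lemma enumerate_fst_ne_zero (l : List String) : ∀ (s : Int), 1 ≤ s →
    ∀ p ∈ PySem.List.enumerate l s, p.1 ≠ 0 := by
  induction l with
  | nil => simp [PySem.List.enumerate_nil]
  | cons x r ih =>
    intro s hs p hp
    rw [PySem.List.enumerate_cons, List.mem_cons] at hp
    rcases hp with hp | hp
    · subst hp; omega
    · exact ih (s + 1) (by omega) p hp

lemma pvScan_head (b : Int) (ts : List String) : ∃ l, pvScan b ts = b :: l := by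
  cases ts <;> simp [pvScan]

lemma pyGetD_append_singleton_neg_one (acc : List Int) (b : Int) :
    PySem.List.pyGetD (acc ++ [b]) (-1) 0 = b := by
  simp [PySem.List.pyGetD, PySem.List.pyGet?, PySem.List.pyIdx?]

lemma foldB (ts : List String) : ∀ (acc : List Int) (b : Int),
    ts.foldl (fun (p : List Int) t => p ++ [PySem.List.pyGetD p (-1) 0 + noSpaceLen t])
      (acc ++ [b]) = acc ++ pvScan b ts := by
  induction ts with
  | nil => intro acc b; simp [pvScan]
  | cons t r ih =>
    intro acc b
    simp only [List.foldl_cons, pyGetD_append_singleton_neg_one]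
    rw [ih (acc ++ [b]) (b + noSpaceLen t)]
    simp [pvScan]

lemma consec (ts : List String) : ∀ (b : Int),
    ((pvScan b ts).dropLast.zip (pvScan b ts).tail).map (fun q => [q.1, q.2])
      = pvPairs b ts := by
  induction ts with
  | nil => intro b; simp [pvScan, pvPairs]
  | cons t r ih =>
    intro b
    obtain ⟨l, hl⟩ := pvScan_head (b + noSpaceLen t) r
    have h2 := ih (b + noSpaceLen t)
    rw [hl] at h2
    simp only [List.tail_cons] at h2
    simp only [pvScan, hl, List.dropLast_cons₂, List.tail_cons, List.zip_cons_cons,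
      List.map_cons, pvPairs]
    rw [h2]

lemma slice_one_neg_one (x : Int) (q : List Int) :
    PySem.List.slice (x :: q) (some 1) (some (-1)) = q.dropLast := by
  simp [PySem.List.slice, PySem.List.clampIdx]
  rw [if_neg (by omega : ¬ ((q.length : Int) < 0)), List.dropLast_eq_take]

lemma slice_two_none (x : Int) (q : List Int) :
    PySem.List.slice (x :: q) (some 2) none = q.tail := by
  cases q with
  | nil => rfl
  | cons y q' => simp [PySem.List.slice, PySem.List.clampIdx]

-- ===== VERDICT (by name: the statement is the Claim_ definition above) =====
theorem setBound_spec : Claim_equal_setBound := by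
  intro texts _
  unfold Spec_setBound setBound setBound_alt
  cases texts with
  | nil => decide
  | cons t rest =>
    rw [PySem.List.enumerate_cons]
    simp only [List.foldl_cons, reduceIte, zero_add]
    rw [foldA (PySem.List.enumerate rest 1) (1 + PySem.Str.len (removeSpace t)) []
          (enumerate_fst_ne_zero rest 1 (le_refl 1))]
    simp only [PySem.List.map_snd_enumerate, List.nil_append, removeSpace_len]
    rw [show PySem.List.pyGetD [(1:Int)] (-1) 0 = 1 from rfl]
    rw [foldB rest [1] (1 + noSpaceLen t)]
    obtain ⟨l, hl⟩ := pvScan_head (1 + noSpaceLen t) rest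
    have h2 := consec rest (1 + noSpaceLen t)
    rw [hl] at h2 ⊢
    simp only [List.tail_cons] at h2
    rw [show ([1] ++ ((1 + noSpaceLen t) :: l) : List Int) = 1 :: (1 + noSpaceLen t) :: l from rfl]
    rw [slice_one_neg_one, slice_two_none, List.tail_cons, h2]
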